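-- pv_equiv track=rewrite | github.com/miliar/Code_Jam_Webscraper | solutions_python/solutions_year16_round1_nr1/1883.py | solve
-- ===== SOURCE A (Python) =====
-- def solve(s):
-- 	ans = s[0]
-- 	for i in range(1, len(s)):
-- 		if s[i] >= ans[0]:
-- 			ans = s[i] + ans
-- 		else:
-- 			ans = ans + s[i]
-- 	return ans
-- ===== SOURCE B (Python) =====
-- def solve(s):
--     # Stage 1: explicit prefix-maximum table; pmax[i] = max(s[:i+1]).
--     pmax = [s[0]]
--     for c in s[1:]:
--         pmax.append(max(pmax[-1], c))
--     # Stage 2: classify each later char against the table (not against running state).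
--     pairs = list(zip(s[1:], pmax))        # pairs s[i] with pmax[i-1]
--     records = [c for c, m in pairs if c >= m]
--     others = [c for c, m in pairs if c < m]
--     # Stage 3: assemble once.
--     return ''.join(reversed([s[0]] + records)) + ''.join(others)
-- ===== Notes on version B (the rewrite author's own statement) =====
-- stated objective: faster
-- what changed: Replaces A's fused loop that rebuilds the answer string by prepend/append at each step with a staged table-then-assemble design: first build an explicit prefix-maximum table, then classify chars against that table with zip+comprehensions (no running state), then join once.
import Mathlib
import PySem

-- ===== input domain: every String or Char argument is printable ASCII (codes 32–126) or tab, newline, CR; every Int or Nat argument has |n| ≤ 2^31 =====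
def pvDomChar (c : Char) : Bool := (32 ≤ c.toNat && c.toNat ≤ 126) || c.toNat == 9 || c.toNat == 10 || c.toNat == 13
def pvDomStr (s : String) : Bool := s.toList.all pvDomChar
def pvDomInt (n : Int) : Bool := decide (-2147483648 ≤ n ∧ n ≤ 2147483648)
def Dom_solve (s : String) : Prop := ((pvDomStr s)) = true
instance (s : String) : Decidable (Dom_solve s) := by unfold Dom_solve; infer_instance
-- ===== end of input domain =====

-- B replaces A's fused prepend/append string rebuilding with a staged design:
-- prefix-maximum table, then zip+filter classification against the table, then one assembly (objective: faster).

-- ===== PORT A =====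
-- A's loop: ans starts as s[0]; prepend s[i] if s[i] >= ans[0], else append.
def solveGo (ans : List Char) : List Char → List Char
  | [] => ans
  | c :: cs => solveGo (if ans.head! ≤ c then c :: ans else ans ++ [c]) cs

def solve (s : String) : String :=
  match s.toList with
  | [] => ""            -- unreachable under Pre_solve: Python raises IndexError on ""
  | c :: cs => String.mk (solveGo [c] cs)

-- ===== PORT B =====
-- Stage 1 of Source B: pmax.append(max(pmax[-1], c)) for each later char.
-- (Python max(a,b) returns a on ties, Lean's max returns b; for Char these are the same value.)
def pmaxGo (pmax : List Char) : List Char → List Char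
  | [] => pmax
  | c :: cs => pmaxGo (pmax ++ [max pmax.getLast! c]) cs

def solve_alt (s : String) : String :=
  match s.toList with
  | [] => ""            -- unreachable under Pre_solve: Python raises IndexError on ""
  | c :: cs =>
      let pmax := pmaxGo [c] cs
      let pairs := cs.zip pmax                               -- zip(s[1:], pmax)
      let records := (pairs.filter (fun p => p.2 ≤ p.1)).map Prod.fst
      let others := (pairs.filter (fun p => ¬ p.2 ≤ p.1)).map Prod.fst
      String.mk ((c :: records).reverse ++ others)

-- ===== PRECONDITION & SPEC =====
-- Pre_ excludes only the empty string, on which both Pythons raise IndexError (s[0]).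
def Pre_solve (s : String) : Prop := s ≠ ""
instance (s : String) : Decidable (Pre_solve s) := by unfold Pre_solve; infer_instance
def pvWitness_solve : String := "ba"

def Spec_solve (s : String) (out : String) : Prop := out = solve_alt s
instance (s : String) (out : String) : Decidable (Spec_solve s out) := by unfold Spec_solve; infer_instance

-- ===== CLAIM (what is proved, stated in full; the proofs are below) =====
def Claim_equal_solve : Prop := ∀ (s : String), Dom_solve s → Pre_solve s → Spec_solve s (solve s)

-- ===== LEMMAS AND PROOFS =====

-- Reference recursion: the (records, others) partition with running max m.
def pairGo (m : Char) : List Char → List Char × List Char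
  | [] => ([], [])
  | c :: cs =>
      if m ≤ c then ((pairGo c cs).1.cons c, (pairGo c cs).2)
      else ((pairGo m cs).1, (pairGo m cs).2.cons c)

-- A's loop in terms of pairGo: prepends go in front reversed, appends at the back.
theorem solveGo_eq (cs : List Char) : ∀ (m : Char) (t : List Char),
    solveGo (m :: t) cs = (pairGo m cs).1.reverse ++ (m :: t) ++ (pairGo m cs).2 := by
  induction cs with
  | nil => intro m t; simp [solveGo, pairGo]
  | cons c cs ih =>
    intro m t
    by_cases h : m ≤ c
    · have : solveGo (m :: t) (c :: cs) = solveGo (c :: (m :: t)) cs := by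
        simp [solveGo, List.head!, h]
      rw [this, ih c (m :: t)]
      simp [pairGo, h, List.append_assoc]
    · have : solveGo (m :: t) (c :: cs) = solveGo (m :: (t ++ [c])) cs := by
        simp [solveGo, List.head!, h]
      rw [this, ih m (t ++ [c])]
      simp [pairGo, h, List.append_assoc]

-- Relative prefix-max stream: the entries pmaxGo appends after seed with last element m.
def pstream (m : Char) : List Char → List Char
  | [] => []
  | c :: cs => max m c :: pstream (max m c) cs

theorem pmaxGo_eq (cs : List Char) : ∀ (acc : List Char), acc ≠ [] →
    pmaxGo acc cs = acc ++ pstream acc.getLast! cs := by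
  induction cs with
  | nil => intro acc _; simp [pmaxGo, pstream]
  | cons c cs ih =>
    intro acc hacc
    rw [show pmaxGo acc (c :: cs) = pmaxGo (acc ++ [max acc.getLast! c]) cs from rfl,
        ih (acc ++ [max acc.getLast! c]) (by simp)]
    simp [pstream, List.append_assoc]

-- B's classification against the pmax table equals the running-max partition pairGo.
theorem zip_filter_eq (cs : List Char) : ∀ (m : Char),
    ((cs.zip (m :: pstream m cs)).filter (fun p => p.2 ≤ p.1)).map Prod.fst = (pairGo m cs).1 ∧
    ((cs.zip (m :: pstream m cs)).filter (fun p => ¬ p.2 ≤ p.1)).map Prod.fst = (pairGo m cs).2 := by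
  induction cs with
  | nil => intro m; simp [pairGo]
  | cons c cs ih =>
    intro m
    by_cases h : m ≤ c
    · have hm : max m c = c := max_eq_right h
      have h2 := ih c
      constructor
      · simpa [pairGo, pstream, hm, h, List.zip] using h2.1
      · simpa [pairGo, pstream, hm, h, List.zip] using h2.2
    · have hm : max m c = m := max_eq_left (le_of_not_ge h)
      have hlt : c < m := lt_of_not_ge h
      have h2 := ih m
      constructor
      · simpa [pairGo, pstream, hm, h, hlt, List.zip] using h2.1
      · simpa [pairGo, pstream, hm, h, hlt, List.zip] using h2.2

-- ===== VERDICT (by name: the statement is the Claim_ definition above) =====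
theorem solve_spec : Claim_equal_solve := by
  intro s _ _
  unfold Spec_solve solve solve_alt
  cases h : s.toList with
  | nil => rfl
  | cons c cs =>
    have hp : pmaxGo [c] cs = c :: pstream c cs := by
      simpa using pmaxGo_eq cs [c] (by simp)
    have hz := zip_filter_eq cs c
    have hA := solveGo_eq cs c []
    simp only [hp, hz.1, hz.2, hA]
    simp [List.append_assoc]
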